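-- pv_equiv track=rewrite | github.com/hanipman/net_apps_final | game.py | checkInDeploymentZone
-- ===== SOURCE A (Python) =====
-- def checkInDeploymentZone(player, pos):
--     deploymentZone = []
--     if(player == 'player1'):
--         for let in 'AB':
--             for num in '12345678':
--                 deploymentZone.append(let+num)
--         if(pos in deploymentZone):
--             return True
--         else:
--             return False
--     else:
--         #player2
--         for let in 'GH':
--             for num in '12345678':
--                 deploymentZone.append(let+num)
--         if(pos in deploymentZone):
--             return True
--         else:
--             return False
-- ===== SOURCE B (Python) =====
-- def checkInDeploymentZone(player, pos):
--     letters = 'AB' if player == 'player1' else 'GH'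
--     return isinstance(pos, str) and len(pos) == 2 and pos[0] in letters and pos[1] in '12345678'
-- ===== Notes on version B (the rewrite author's own statement) =====
-- stated objective: simpler
-- what changed: Instead of enumerating all 16 deployment-zone cells into a list and testing membership, B validates the position componentwise: its letter must be in the player's two-letter band and its number in '1'..'8'.
import Mathlib
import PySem

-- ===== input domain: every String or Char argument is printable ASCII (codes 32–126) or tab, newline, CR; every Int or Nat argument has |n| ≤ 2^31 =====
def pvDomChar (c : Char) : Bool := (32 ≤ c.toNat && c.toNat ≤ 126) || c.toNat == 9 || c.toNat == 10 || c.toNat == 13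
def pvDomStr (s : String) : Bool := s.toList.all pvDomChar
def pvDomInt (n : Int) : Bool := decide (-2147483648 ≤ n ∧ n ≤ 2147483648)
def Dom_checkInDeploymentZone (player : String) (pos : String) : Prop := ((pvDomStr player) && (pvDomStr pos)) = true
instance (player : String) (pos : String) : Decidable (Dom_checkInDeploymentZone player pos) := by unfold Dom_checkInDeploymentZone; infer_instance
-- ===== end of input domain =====

-- B replaces A's build-the-16-cell-zone-then-membership pass by a componentwise check of the position (objective: simpler).


-- ===== PORT A =====
-- literal port of A: build the 16-cell deployment zone by the double loop, then a membership test
def checkInDeploymentZone (player : String) (pos : String) : Bool :=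
  if player == "player1" then
    if ("AB".toList.foldl (fun acc l =>
          "12345678".toList.foldl (fun acc n => acc ++ [String.ofList [l, n]]) acc)
          ([] : List String)).contains pos then true else false
  else
    if ("GH".toList.foldl (fun acc l =>
          "12345678".toList.foldl (fun acc n => acc ++ [String.ofList [l, n]]) acc)
          ([] : List String)).contains pos then true else false

-- ===== PORT B =====
-- port of B: componentwise check — the position's letter in the player's band, its number in '1'..'8'
def checkInDeploymentZone_alt (player : String) (pos : String) : Bool :=
  match pos.toList with
  | [c, d] => (if player == "player1" then "AB" else "GH").toList.contains c
                && "12345678".toList.contains d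
  | _ => false

-- ===== PRECONDITION & SPEC =====
def Spec_checkInDeploymentZone (player : String) (pos : String) (out : Bool) : Prop := out = checkInDeploymentZone_alt player pos
instance (player : String) (pos : String) (out : Bool) : Decidable (Spec_checkInDeploymentZone player pos out) := by unfold Spec_checkInDeploymentZone; infer_instance

-- ===== CLAIM (what is proved, stated in full; the proofs are below) =====
def Claim_equal_checkInDeploymentZone : Prop := ∀ (player : String) (pos : String), Dom_checkInDeploymentZone player pos → Spec_checkInDeploymentZone player pos (checkInDeploymentZone player pos)

-- ===== LEMMAS AND PROOFS =====

theorem pv_toList_inj (s t : String) (h : s.toList = t.toList) : s = t := by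
  have := congrArg String.ofList h; simpa using this

theorem pv_beq_str (s t : String) : (s == t) = (s.toList == t.toList) := by
  by_cases h : s = t
  · simp [h]
  · have h2 : s.toList ≠ t.toList := fun hh => h (pv_toList_inj _ _ hh)
    simp [h, h2]

theorem pv_zfoldA : ("AB".toList.foldl (fun acc l =>
      "12345678".toList.foldl (fun acc n => acc ++ [String.ofList [l, n]]) acc)
      ([] : List String))
    = ["A1","A2","A3","A4","A5","A6","A7","A8","B1","B2","B3","B4","B5","B6","B7","B8"] := by rfl

theorem pv_zfoldB : ("GH".toList.foldl (fun acc l =>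
      "12345678".toList.foldl (fun acc n => acc ++ [String.ofList [l, n]]) acc)
      ([] : List String))
    = ["G1","G2","G3","G4","G5","G6","G7","G8","H1","H2","H3","H4","H5","H6","H7","H8"] := by rfl

theorem pv_if_true_false (b : Bool) : (if b then true else false) = b := by cases b <;> rfl

theorem pv_zoneA_contains (pos : String) :
    (["A1","A2","A3","A4","A5","A6","A7","A8","B1","B2","B3","B4","B5","B6","B7","B8"] : List String).contains pos
    = (match pos.toList with
       | [c, d] => "AB".toList.contains c && "12345678".toList.contains d
       | _ => false) := by
  simp only [List.contains_cons, List.contains_nil, pv_beq_str, Bool.or_false,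
    show ("AB".toList) = ['A','B'] from rfl,
    show ("12345678".toList) = ['1','2','3','4','5','6','7','8'] from rfl]
  generalize pos.toList = l
  rcases l with _|⟨c,_|⟨d,_|rest⟩⟩ <;> simp
  rw [Bool.and_or_distrib_right]
  simp only [Bool.and_or_distrib_left, Bool.or_assoc]

theorem pv_zoneB_contains (pos : String) :
    (["G1","G2","G3","G4","G5","G6","G7","G8","H1","H2","H3","H4","H5","H6","H7","H8"] : List String).contains pos
    = (match pos.toList with
       | [c, d] => "GH".toList.contains c && "12345678".toList.contains d
       | _ => false) := by
  simp only [List.contains_cons, List.contains_nil, pv_beq_str, Bool.or_false,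
    show ("GH".toList) = ['G','H'] from rfl,
    show ("12345678".toList) = ['1','2','3','4','5','6','7','8'] from rfl]
  generalize pos.toList = l
  rcases l with _|⟨c,_|⟨d,_|rest⟩⟩ <;> simp
  rw [Bool.and_or_distrib_right]
  simp only [Bool.and_or_distrib_left, Bool.or_assoc]

-- ===== VERDICT (by name: the statement is the Claim_ definition above) =====
theorem checkInDeploymentZone_spec : Claim_equal_checkInDeploymentZone := by
  intro player pos _
  unfold Spec_checkInDeploymentZone checkInDeploymentZone checkInDeploymentZone_alt
  by_cases h : player == "player1"
  · rw [if_pos h, pv_zfoldA, pv_zoneA_contains]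
    rw [pv_if_true_false]
    simp only [if_pos h]
  · rw [if_neg h, pv_zfoldB, pv_zoneB_contains]
    rw [pv_if_true_false]
    simp only [if_neg h]
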